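-- pv_equiv track=rewrite | github.com/shuji-oh/reverse_engineering_CAN | reverse_engineering_CAN.py | Phase1
-- ===== SOURCE A (Python) =====
-- def Phase1(magnitude, DLC):
-- 	ref = list()
-- 	prevMagnitude = magnitude[0]
-- 	ixS = 0
-- 	for ix in range(1, DLC):
-- 		if magnitude[ix] < prevMagnitude :
-- 			ref.append((ixS, ix-1))
-- 			ixS = ix
-- 		prevMagnitude = magnitude[ix]
-- 	ref.append((ixS, DLC-1))
-- 	return ref
-- ===== SOURCE B (Python) =====
-- def Phase1(magnitude, DLC):
--     breaks = [ix for ix in range(1, DLC) if magnitude[ix] < magnitude[ix - 1]]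
--     bounds = [0] + breaks + [DLC]
--     return [(s, e - 1) for s, e in zip(bounds, bounds[1:])]
-- ===== Notes on version B (the rewrite author's own statement) =====
-- stated objective: alternative
-- what changed: Replaces the single pass with running state (prevMagnitude, ixS, growing ref) by a two-phase index-then-reconstruct shape: collect all breakpoint indices by a stateless filter, then zip consecutive boundaries into intervals.
import Mathlib
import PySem

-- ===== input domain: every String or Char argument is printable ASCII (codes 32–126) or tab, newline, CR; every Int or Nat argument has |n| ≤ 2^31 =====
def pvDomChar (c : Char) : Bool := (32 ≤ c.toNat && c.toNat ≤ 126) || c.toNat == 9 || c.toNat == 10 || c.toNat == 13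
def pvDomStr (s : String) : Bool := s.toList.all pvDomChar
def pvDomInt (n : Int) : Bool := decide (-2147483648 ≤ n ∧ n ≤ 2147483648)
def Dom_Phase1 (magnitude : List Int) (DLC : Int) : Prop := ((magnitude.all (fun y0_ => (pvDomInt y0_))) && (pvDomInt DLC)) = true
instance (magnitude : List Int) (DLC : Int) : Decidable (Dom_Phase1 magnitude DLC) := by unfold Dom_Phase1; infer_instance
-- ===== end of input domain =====

-- B replaces A's running-state single pass by a stateless breakpoint filter plus
-- boundary zipping (alternative decomposition, same cost).

-- ===== PORT A =====
-- loop body of A's for-loop: state = (ref, prevMagnitude, ixS)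
def pvStep (magnitude : List Int) (st : List (Int × Int) × Int × Int) (ix : Int) :
    List (Int × Int) × Int × Int :=
  if PySem.List.pyGetD magnitude ix 0 < st.2.1 then
    (st.1 ++ [(st.2.2, ix - 1)], PySem.List.pyGetD magnitude ix 0, ix)
  else
    (st.1, PySem.List.pyGetD magnitude ix 0, st.2.2)

def Phase1 (magnitude : List Int) (DLC : Int) : List (Int × Int) :=
  let st := (PySem.List.pyRange 1 DLC 1).foldl (pvStep magnitude)
              ([], PySem.List.pyGetD magnitude 0 0, 0)
  st.1 ++ [(st.2.2, DLC - 1)]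

-- ===== PORT B =====
def Phase1_alt (magnitude : List Int) (DLC : Int) : List (Int × Int) :=
  let breaks := (PySem.List.pyRange 1 DLC 1).filter
      (fun ix => decide (PySem.List.pyGetD magnitude ix 0 < PySem.List.pyGetD magnitude (ix - 1) 0))
  let bounds : List Int := [0] ++ breaks ++ [DLC]
  List.zipWith (fun s e => (s, e - 1)) bounds (bounds.drop 1)

-- ===== PRECONDITION & SPEC =====
-- A raises IndexError unless magnitude is nonempty (the unconditional magnitude[0]) and
-- every loop index 1..DLC-1 is in range, i.e. DLC ≤ len(magnitude).
def Pre_Phase1 (magnitude : List Int) (DLC : Int) : Prop :=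
  magnitude ≠ [] ∧ DLC ≤ (magnitude.length : Int)
instance (magnitude : List Int) (DLC : Int) : Decidable (Pre_Phase1 magnitude DLC) := by
  unfold Pre_Phase1; infer_instance

def pvWitness_Phase1 : List Int × Int := ([3, 1, 2], 3)

def Spec_Phase1 (magnitude : List Int) (DLC : Int) (out : List (Int × Int)) : Prop :=
  out = Phase1_alt magnitude DLC
instance (magnitude : List Int) (DLC : Int) (out : List (Int × Int)) :
    Decidable (Spec_Phase1 magnitude DLC out) := by unfold Spec_Phase1; infer_instance

-- ===== CLAIM (what is proved, stated in full; the proofs are below) =====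
def Claim_equal_Phase1 : Prop := ∀ (magnitude : List Int) (DLC : Int), Dom_Phase1 magnitude DLC → Pre_Phase1 magnitude DLC → Spec_Phase1 magnitude DLC (Phase1 magnitude DLC)

-- ===== LEMMAS AND PROOFS =====

-- [a, a+1, ..., a+n-1] as a structurally recursive list
def pvConsec (a : Int) : Nat → List Int
  | 0 => []
  | n + 1 => a :: pvConsec (a + 1) n

-- intervals from a start, inner breakpoints and an end bound
def pvMk (s : Int) (bs : List Int) (e : Int) : List (Int × Int) :=
  match bs with
  | [] => [(s, e - 1)]
  | b :: bs' => (s, b - 1) :: pvMk b bs' e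

theorem pvRange_eq_consec : ∀ (n : Nat) (a : Int),
    PySem.List.pyRange a (a + n) 1 = pvConsec a n := by
  intro n
  induction n with
  | zero => intro a; simp [pvConsec, PySem.List.pyRange_one_eq_nil]
  | succ k ih =>
    intro a
    rw [PySem.List.pyRange_one_cons (by push_cast; omega)]
    have h : a + ((k + 1 : Nat) : Int) = (a + 1) + (k : Nat) := by push_cast; omega
    rw [h, ih]
    rfl

theorem pvRange_one_DLC (DLC : Int) :
    PySem.List.pyRange 1 DLC 1 = pvConsec 1 (DLC - 1).toNat := by
  by_cases h : DLC ≤ 1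
  · have h0 : (DLC - 1).toNat = 0 := by omega
    rw [h0, PySem.List.pyRange_one_eq_nil h]; rfl
  · have h1 : DLC = 1 + ((DLC - 1).toNat : Int) := by omega
    calc PySem.List.pyRange 1 DLC 1
        = PySem.List.pyRange 1 (1 + ((DLC - 1).toNat : Int)) 1 := by rw [← h1]
      _ = pvConsec 1 (DLC - 1).toNat := pvRange_eq_consec _ 1

theorem pvZip : ∀ (bs : List Int) (s e : Int),
    List.zipWith (fun x y => (x, y - 1)) (s :: (bs ++ [e])) (bs ++ [e]) = pvMk s bs e := by
  intro bs
  induction bs with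
  | nil => intro s e; simp [pvMk]
  | cons b bs' ih =>
    intro s e
    simpa [pvMk, List.zipWith] using ih b e

theorem pvFoldConsec (magnitude : List Int) (DLC : Int) :
    ∀ (n : Nat) (a : Int) (ref : List (Int × Int)) (ixS : Int),
      (let st := (pvConsec a n).foldl (pvStep magnitude)
                   (ref, PySem.List.pyGetD magnitude (a - 1) 0, ixS)
       st.1 ++ [(st.2.2, DLC - 1)])
      = ref ++ pvMk ixS ((pvConsec a n).filter
          (fun ix => decide (PySem.List.pyGetD magnitude ix 0 < PySem.List.pyGetD magnitude (ix - 1) 0))) DLC := by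
  intro n
  induction n with
  | zero => intro a ref ixS; simp [pvConsec, pvMk]
  | succ k ih =>
    intro a ref ixS
    show (let st := ((a :: pvConsec (a + 1) k).foldl (pvStep magnitude)
                   (ref, PySem.List.pyGetD magnitude (a - 1) 0, ixS))
          st.1 ++ [(st.2.2, DLC - 1)]) = _
    by_cases h : PySem.List.pyGetD magnitude a 0 < PySem.List.pyGetD magnitude (a - 1) 0
    · have hstep : pvStep magnitude (ref, PySem.List.pyGetD magnitude (a - 1) 0, ixS) a
          = (ref ++ [(ixS, a - 1)], PySem.List.pyGetD magnitude ((a + 1) - 1) 0, a) := by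
        simp [pvStep, h]
      rw [List.foldl_cons, hstep]
      rw [ih (a + 1) (ref ++ [(ixS, a - 1)]) a]
      simp [pvConsec, pvMk, h]
    · have hstep : pvStep magnitude (ref, PySem.List.pyGetD magnitude (a - 1) 0, ixS) a
          = (ref, PySem.List.pyGetD magnitude ((a + 1) - 1) 0, ixS) := by
        simp [pvStep, h]
      rw [List.foldl_cons, hstep]
      rw [ih (a + 1) ref ixS]
      simp [pvConsec, h]

-- ===== VERDICT (by name: the statement is the Claim_ definition above) =====
theorem Phase1_spec : Claim_equal_Phase1 := by
  intro magnitude DLC _ _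
  show Phase1 magnitude DLC = Phase1_alt magnitude DLC
  unfold Phase1 Phase1_alt
  rw [pvRange_one_DLC]
  have hg : PySem.List.pyGetD magnitude 0 0 = PySem.List.pyGetD magnitude ((1 : Int) - 1) 0 := by
    norm_num
  rw [hg, pvFoldConsec magnitude DLC ((DLC - 1).toNat) 1 [] 0]
  simp [pvZip]
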